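-- pv_equiv track=rewrite | github.com/tobyhogan/cs-projects | sort-algos-28-feb/insertion-sort.py | hard_insertion
-- ===== SOURCE A (Python) =====
-- def hard_insertion(data):
--     # creates a list variable that will contain the sorted items and sets it to 0, so there is something for the program to work with
--     sorted_data = [0]
--     # goes through each item in the data set
--     for i in data:
--         # sub-iterates through each item in the sorted data set, also enumerating to give access to it's index
--         for e, j in enumerate(sorted_data):
--             # if the program is at the end of the list, only insert the element if the item before is smaller - no comparison to non-existant last element
--             if len(sorted_data) <= (e + 1):
--                 # the comparision for insertion
--                 if (i > j):
--                     # the actual insertion itself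
--                     sorted_data.insert(e + 1, i)
--
--             # if there is more elements after the current one, do the comparision for the element after, as well as before
--             elif (i > j) and (i < sorted_data[e + 1]):
--                 # inserting the element
--                 sorted_data.insert(e + 1, i)
--     # removing the first element which wasn't actually needed, just used to get things started
--     sorted_data.remove(0)
--     # outputting the value from the function
--     return sorted_data
-- ===== SOURCE B (Python) =====
-- def hard_insertion(data):
--     # one pass collecting the distinct strictly-positive values, then a single sort
--     return sorted({x for x in data if x > 0})
-- ===== Notes on version B (the rewrite author's own statement) =====
-- stated objective: simpler
-- what changed: Replaces the sentinel-seeded insertion sort (scan of the growing sorted list per element, with strict comparisons doing dedup/positive filtering implicitly) by a one-pass set comprehension over the positives followed by a single library sort.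
import Mathlib
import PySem

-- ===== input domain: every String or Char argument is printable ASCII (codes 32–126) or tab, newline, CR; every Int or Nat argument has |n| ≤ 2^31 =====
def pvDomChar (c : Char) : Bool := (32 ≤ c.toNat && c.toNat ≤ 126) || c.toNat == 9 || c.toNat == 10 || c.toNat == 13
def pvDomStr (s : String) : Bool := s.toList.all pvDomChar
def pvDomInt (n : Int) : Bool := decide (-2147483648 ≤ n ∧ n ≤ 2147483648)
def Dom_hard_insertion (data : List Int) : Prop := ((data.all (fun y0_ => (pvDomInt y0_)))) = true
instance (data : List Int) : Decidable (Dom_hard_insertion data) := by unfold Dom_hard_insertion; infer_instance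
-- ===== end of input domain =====

-- B replaces the sentinel-seeded insertion scan by "collect distinct positives, then one sort" (simpler, asymptotically faster).

-- ===== PORT A =====
-- Python's inner `for e, j in enumerate(sorted_data)` iterates BY INDEX over the list being
-- mutated, so the port recurses on the index e re-reading the current list; `fuel` only makes
-- the recursion total (the loop visits at most lst.length + 1 indices, since at most one
-- insertion can fire per outer element, so fuel = lst.length + 2 is never exhausted).
def pvInnerA (fuel : Nat) (e : Nat) (i : Int) (lst : List Int) : List Int :=
  match fuel with
  | 0 => lst
  | f + 1 =>
    if h : e < lst.length then
      let j := lst[e]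
      let lst' :=
        if h2 : lst.length ≤ e + 1 then
          -- end of list: `if (i > j): sorted_data.insert(e + 1, i)`
          if j < i then PySem.List.insert lst ((e : Int) + 1) i else lst
        else
          -- `elif (i > j) and (i < sorted_data[e + 1]): sorted_data.insert(e + 1, i)`
          if j < i ∧ i < lst[e + 1]'(by omega) then PySem.List.insert lst ((e : Int) + 1) i else lst
      pvInnerA f (e + 1) i lst'
    else lst

def hard_insertion (data : List Int) : List Int :=
  let sd := data.foldl (fun sd i => pvInnerA (sd.length + 2) 0 i sd) [0]
  -- `sorted_data.remove(0)`: the sentinel 0 always stays at the head, so remove? never raises;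
  -- the .getD [] default is unreachable.
  (PySem.List.remove? sd 0).getD []

-- ===== PORT B =====
def hard_insertion_alt (data : List Int) : List Int :=
  -- sorted({x for x in data if x > 0})
  PySem.List.sorted (PySem.Set.ofList (data.filter (fun x => decide (0 < x)))) (fun x => x) false

-- ===== PRECONDITION & SPEC =====
def Spec_hard_insertion (data : List Int) (out : List Int) : Prop := out = hard_insertion_alt data
instance (data : List Int) (out : List Int) : Decidable (Spec_hard_insertion data out) := by unfold Spec_hard_insertion; infer_instance

-- ===== CLAIM (what is proved, stated in full; the proofs are below) =====
def Claim_equal_hard_insertion : Prop := ∀ (data : List Int), Dom_hard_insertion data → Spec_hard_insertion data (hard_insertion data)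

-- ===== LEMMAS AND PROOFS =====

-- structural reading of one inner scan of A (proved equal to pvInnerA on sorted lists below)
def pvG (i : Int) : List Int → List Int
  | [] => []
  | [j] => if j < i then [j, i] else [j]
  | j :: k :: t => if j < i ∧ i < k then j :: i :: k :: t else j :: pvG i (k :: t)

-- the scan never changes the list once every remaining element is ≥ i
lemma pvInnerA_noop : ∀ (f e : Nat) (i : Int) (lst : List Int),
    (∀ x ∈ lst.drop e, i ≤ x) → pvInnerA f e i lst = lst := by
  intro f
  induction f with
  | zero => intro e i lst _; rfl
  | succ f ih =>
    intro e i lst hge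
    show pvInnerA (f + 1) e i lst = lst
    rw [pvInnerA]
    split
    case isTrue h =>
      have hj : lst[e] ∈ lst.drop e := by
        have h0 : lst[e] = (lst.drop e)[0]'(by simp; omega) := by simp
        rw [h0]; exact List.getElem_mem _
      have hij : ¬ lst[e] < i := not_lt.mpr (hge _ hj)
      have hdrop : ∀ x ∈ lst.drop (e + 1), i ≤ x := by
        intro x hx
        apply hge
        have h1 : lst.drop (e + 1) = (lst.drop e).drop 1 := by
          rw [List.drop_drop]
        exact List.drop_subset 1 (lst.drop e) (h1 ▸ hx)
      have hlst' : (if h2 : lst.length ≤ e + 1 then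
          (if lst[e] < i then PySem.List.insert lst ((e : Int) + 1) i else lst)
        else
          (if lst[e] < i ∧ i < lst[e + 1]'(by omega) then PySem.List.insert lst ((e : Int) + 1) i
           else lst)) = lst := by
        split <;> simp [hij]
      simp only [hlst']
      exact ih (e + 1) i lst hdrop
    case isFalse h => rfl

lemma take_len1 (pre : List Int) (j : Int) (rest : List Int) :
    (pre ++ j :: rest).take (pre.length + 1) = pre ++ [j] := by
  have h : pre ++ j :: rest = (pre ++ [j]) ++ rest := by simp
  rw [h, List.take_left' (by simp)]

lemma drop_len1 (pre : List Int) (j : Int) (rest : List Int) :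
    (pre ++ j :: rest).drop (pre.length + 1) = rest := by
  have h : pre ++ j :: rest = (pre ++ [j]) ++ rest := by simp
  rw [h, List.drop_left' (by simp)]

lemma insert_mid (pre : List Int) (j : Int) (rest : List Int) (i : Int) :
    PySem.List.insert (pre ++ j :: rest) ((pre.length : Int) + 1) i = pre ++ j :: i :: rest := by
  have hc : ((pre.length : Int) + 1) = ((pre.length + 1 : Nat) : Int) := by push_cast; ring
  rw [hc, PySem.List.insert_natCast _ _ _ (by simp), take_len1, drop_len1]
  simp

lemma pvInnerA_eq_pvG : ∀ (suf pre : List Int) (i : Int) (f : Nat),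
    List.IsChain (· < ·) (pre ++ suf) → suf.length + 2 ≤ f →
    pvInnerA f pre.length i (pre ++ suf) = pre ++ pvG i suf := by
  intro suf
  induction suf with
  | nil =>
    intro pre i f _ hf
    obtain ⟨f', rfl⟩ : ∃ f', f = f' + 1 := ⟨f - 1, by omega⟩
    rw [pvInnerA]
    simp [pvG]
  | cons j rest ih =>
    intro pre i f hchain hf
    obtain ⟨f', rfl⟩ : ∃ f', f = f' + 1 := ⟨f - 1, by omega⟩
    have hlen : pre.length < (pre ++ j :: rest).length := by simp
    have hje : (pre ++ j :: rest)[pre.length]'hlen = j := by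
      rw [List.getElem_append_right (le_refl pre.length)]
      simp
    rw [pvInnerA]
    rw [dif_pos hlen]
    simp only [hje]
    cases rest with
    | nil =>
      have h2 : (pre ++ [j]).length ≤ pre.length + 1 := by simp
      rw [dif_pos h2]
      by_cases hji : j < i
      · rw [if_pos hji, insert_mid]
        rw [pvInnerA_noop _ _ _ _ (by
          intro x hx
          rw [drop_len1] at hx
          simp at hx
          omega)]
        simp [pvG, hji]
      · rw [if_neg hji]
        rw [pvInnerA_noop _ _ _ _ (by
          intro x hx
          rw [drop_len1] at hx
          simp at hx)]
        simp [pvG, hji]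
    | cons k t =>
      have h2 : ¬ (pre ++ j :: k :: t).length ≤ pre.length + 1 := by simp
      rw [dif_neg h2]
      have hke : (pre ++ j :: k :: t)[pre.length + 1]'(by omega) = k := by
        rw [List.getElem_append_right (by omega)]
        simp
      simp only [hke]
      have hpw : (j :: k :: t).Pairwise (· < ·) := by
        have := hchain.pairwise
        exact (List.pairwise_append.mp this).2.1
      have hjk : j < k := (List.pairwise_cons.mp hpw).1 k (by simp)
      have hkt : ∀ x ∈ t, k < x :=
        (List.pairwise_cons.mp (List.pairwise_cons.mp hpw).2).1
      by_cases hc : j < i ∧ i < k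
      · rw [if_pos hc, insert_mid]
        rw [pvInnerA_noop _ _ _ _ (by
          intro x hx
          rw [drop_len1] at hx
          simp at hx
          rcases hx with h | h | h
          · exact le_of_eq h.symm
          · exact h ▸ le_of_lt hc.2
          · exact le_of_lt (lt_trans hc.2 (hkt x h)))]
        simp [pvG, hc]
      · rw [if_neg hc]
        have hassoc : pre ++ j :: k :: t = (pre ++ [j]) ++ k :: t := by simp
        have hlen' : pre.length + 1 = (pre ++ [j]).length := by simp
        rw [hassoc, hlen', ih (pre ++ [j]) i f' (by rw [← hassoc]; exact hchain) (by
          simp at hf ⊢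
          omega)]
        simp [pvG, hc]

lemma pvG_spec : ∀ (s : List Int) (c i : Int), List.IsChain (· < ·) (c :: s) →
    ∃ s', pvG i (c :: s) = c :: s' ∧ List.IsChain (· < ·) (c :: s') ∧
      (∀ x, x ∈ s' ↔ x ∈ s ∨ (x = i ∧ c < i)) := by
  intro s
  induction s with
  | nil =>
    intro c i _
    by_cases hci : c < i
    · exact ⟨[i], by simp [pvG, hci], by simp [List.isChain_cons, hci], by simp [hci]⟩
    · exact ⟨[], by simp [pvG, hci], by simp, by simp [hci]⟩
  | cons k t ih =>
    intro c i hchain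
    have hck : c < k := ((List.isChain_cons.mp hchain).1 k (by simp))
    have hkt : List.IsChain (· < ·) (k :: t) := (List.isChain_cons.mp hchain).2
    by_cases hc : c < i ∧ i < k
    · refine ⟨i :: k :: t, by simp [pvG, hc], ?_, ?_⟩
      · rw [List.isChain_cons]
        exact ⟨by simp [hc.1], by rw [List.isChain_cons]; exact ⟨by simp [hc.2], hkt⟩⟩
      · intro x; simp [hc.1]; tauto
    · obtain ⟨s'', hg, hch, hmem⟩ := ih k i hkt
      refine ⟨k :: s'', ?_, ?_, ?_⟩
      · show pvG i (c :: k :: t) = c :: k :: s''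
        rw [pvG, if_neg hc, hg]
      · rw [List.isChain_cons]
        exact ⟨by simpa using hck, hch⟩
      · intro x
        simp only [List.mem_cons, hmem x]
        constructor
        · rintro (rfl | h | ⟨rfl, hki⟩)
          · exact Or.inl (by simp)
          · exact Or.inl (by simp [h])
          · exact Or.inr ⟨rfl, lt_trans hck hki⟩
        · rintro (h | ⟨rfl, hci⟩)
          · rcases h with rfl | h
            · exact Or.inl rfl
            · exact Or.inr (Or.inl h)
          · rcases lt_or_ge k x with hki | hik
            · exact Or.inr (Or.inr ⟨rfl, hki⟩)
            · have : x = k := le_antisymm hik (by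
                rcases lt_trichotomy x k with h1 | h1 | h1
                · exact absurd (And.intro hci h1) hc
                · exact le_of_eq h1.symm
                · exact le_of_lt h1)
              exact Or.inl this
      

lemma fold_inv : ∀ (data s : List Int), List.IsChain (· < ·) (0 :: s) →
    ∃ s', data.foldl (fun sd i => pvInnerA (sd.length + 2) 0 i sd) (0 :: s) = 0 :: s' ∧
      List.IsChain (· < ·) (0 :: s') ∧
      (∀ x, x ∈ s' ↔ x ∈ s ∨ (x ∈ data ∧ 0 < x)) := by
  intro data
  induction data with
  | nil => intro s hch; exact ⟨s, rfl, hch, by simp⟩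
  | cons i d ih =>
    intro s hch
    have hstep : pvInnerA ((0 :: s).length + 2) 0 i (0 :: s) = pvG i (0 :: s) := by
      have h0 := pvInnerA_eq_pvG (0 :: s) [] i ((0 :: s).length + 2) (by simpa using hch) (by simp)
      simpa using h0
    obtain ⟨s1, hg, hch1, hmem1⟩ := pvG_spec s 0 i hch
    obtain ⟨s', hfold, hch', hmem'⟩ := ih s1 hch1
    refine ⟨s', ?_, hch', ?_⟩
    · rw [List.foldl_cons, hstep, hg, hfold]
    · intro x
      rw [hmem' x, hmem1 x]
      simp only [List.mem_cons]
      rcases eq_or_ne x i with rfl | hne <;> tauto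

-- ===== VERDICT (by name: the statement is the Claim_ definition above) =====
theorem hard_insertion_spec : Claim_equal_hard_insertion := by
  intro data _
  unfold Spec_hard_insertion hard_insertion hard_insertion_alt
  obtain ⟨s', hfold, hch', hmem'⟩ := fold_inv data [] (by simp)
  rw [hfold]
  simp only [PySem.List.remove?_cons_self, Option.getD_some]
  have hpw : s'.Pairwise (· < ·) := List.pairwise_cons.mp hch'.pairwise |>.2
  have hnd : s'.Nodup := hpw.imp ne_of_lt
  symm
  apply PySem.List.sorted_eq_of_perm_of_pairwise_lt
  · rw [List.perm_ext_iff_of_nodup hnd (PySem.Set.nodup_ofList _)]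
    intro x
    rw [hmem' x, PySem.Set.mem_ofList, List.mem_filter]
    simp
  · exact hpw
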